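-- pv_equiv track=rewrite | github.com/haripriyad252/Foundations-of-AI | HW 3/hw3.py | dist_negimp
-- ===== SOURCE A (Python) =====
-- def dist_negimp(exp):
--   if exp.startswith('~'):
--     split = exp.split("&")
--     newsplit=[]
--     newsplit.append(split[0])
--     for each in split[1:]:
--       e = '~'+each
--       newsplit.append(e)
--     return newsplit
--   else:
--     split = exp.split("&")
--     return split
-- ===== SOURCE B (Python) =====
-- def dist_negimp(exp):
--   neg = exp.startswith('~')
--   out = []
--   cur = []
--   for ch in exp:
--     if ch == '&':
--       out.append(''.join(cur))
--       cur = ['~'] if neg else []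
--     else:
--       cur.append(ch)
--   out.append(''.join(cur))
--   return out
-- ===== Notes on version B (the rewrite author's own statement) =====
-- stated objective: alternative
-- what changed: B never calls split: it scans the string once character by character with a current-segment accumulator, flushing at each '&' and seeding the next segment with '~' when the string starts with '~', instead of A's split-into-a-list followed by a second loop that rebuilds the tail with '~' prefixes.
import Mathlib
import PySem

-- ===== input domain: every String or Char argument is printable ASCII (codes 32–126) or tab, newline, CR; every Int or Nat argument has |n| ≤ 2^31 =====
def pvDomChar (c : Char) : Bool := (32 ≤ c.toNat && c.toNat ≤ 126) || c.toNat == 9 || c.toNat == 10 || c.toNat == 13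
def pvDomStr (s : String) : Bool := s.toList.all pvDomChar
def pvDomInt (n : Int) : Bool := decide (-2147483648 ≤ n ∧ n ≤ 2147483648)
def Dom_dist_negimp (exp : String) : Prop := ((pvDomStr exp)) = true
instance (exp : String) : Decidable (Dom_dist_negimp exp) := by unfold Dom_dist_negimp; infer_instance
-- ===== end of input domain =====

-- B replaces A's split-then-second-loop by a single character scan with a current-segment
-- accumulator that seeds '~' after each '&' when the input starts with '~': alternative decomposition, same cost.

-- ===== PORT A =====
def dist_negimp (exp : String) : List String :=
  if PySem.Str.startswith exp "~" then
    let split := (PySem.Chars.splitOn exp.toList "&".toList).map String.ofList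
    match split with
    | [] => []   -- unreachable: str.split('&') never returns an empty list
    | s0 :: rest =>
        rest.foldl (fun newsplit each => newsplit ++ [String.ofList ('~' :: each.toList)]) [s0]
  else
    (PySem.Chars.splitOn exp.toList "&".toList).map String.ofList

-- ===== PORT B =====
-- the for-loop over the characters, state (cur, out)
def dist_negimp_altGo (neg : Bool) : List Char → List Char → List String → List String
  | [], cur, out => out ++ [String.ofList cur]
  | c :: t, cur, out =>
      if c = '&' then
        dist_negimp_altGo neg t (if neg then ['~'] else []) (out ++ [String.ofList cur])
      else
        dist_negimp_altGo neg t (cur ++ [c]) out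

def dist_negimp_alt (exp : String) : List String :=
  dist_negimp_altGo (PySem.Str.startswith exp "~") exp.toList [] []

-- ===== PRECONDITION & SPEC =====
def Spec_dist_negimp (exp : String) (out : List String) : Prop := out = dist_negimp_alt exp
instance (exp : String) (out : List String) : Decidable (Spec_dist_negimp exp out) := by unfold Spec_dist_negimp; infer_instance

-- ===== CLAIM (what is proved, stated in full; the proofs are below) =====
def Claim_equal_dist_negimp : Prop := ∀ (exp : String), Dom_dist_negimp exp → Spec_dist_negimp exp (dist_negimp exp)

-- ===== LEMMAS AND PROOFS =====

-- Split on '&' as a structural recursion: (first segment, remaining segments).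
def pvSc : List Char → List Char × List (List Char)
  | [] => ([], [])
  | c :: t =>
      let r := pvSc t
      if c = '&' then ([], r.1 :: r.2) else (c :: r.1, r.2)

theorem splitOn_go_eq (fuel : Nat) : ∀ (l cur : List Char) (acc : List (List Char)),
    l.length ≤ fuel →
    PySem.Chars.splitOn.go ['&'] fuel l cur acc
      = acc.reverse ++ ((cur.reverse ++ (pvSc l).1) :: (pvSc l).2) := by
  induction fuel with
  | zero =>
    intro l cur acc h
    have : l = [] := by cases l <;> simp_all
    subst this
    simp [PySem.Chars.splitOn.go, pvSc]
  | succ n ih =>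
    intro l cur acc h
    cases l with
    | nil => simp [PySem.Chars.splitOn.go, pvSc]
    | cons c rest =>
      by_cases hc : c = '&'
      · subst hc
        have hpre : List.isPrefixOf ['&'] ('&' :: rest) = true := by simp [List.isPrefixOf]
        simp only [PySem.Chars.splitOn.go, hpre, if_true]
        rw [show List.drop (['&'].length) ('&' :: rest) = rest from rfl,
          ih rest [] (cur.reverse :: acc) (by simpa using Nat.le_of_succ_le_succ h)]
        simp [pvSc]
      · have hpre : List.isPrefixOf ['&'] (c :: rest) = false := by
          simp only [List.isPrefixOf, Bool.and_true, beq_eq_false_iff_ne, ne_eq]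
          exact fun h => hc h.symm
        simp only [PySem.Chars.splitOn.go, hpre, Bool.false_eq_true, if_false]
        rw [ih rest (c :: cur) acc (by simpa using Nat.le_of_succ_le_succ h)]
        simp [pvSc, hc]

theorem splitOn_eq (l : List Char) :
    PySem.Chars.splitOn l ['&'] = (pvSc l).1 :: (pvSc l).2 := by
  unfold PySem.Chars.splitOn
  rw [splitOn_go_eq (l.length + 1) l [] [] (Nat.le_succ _)]
  simp

theorem foldl_append_map {α β : Type} (f : α → β) (l : List α) :
    ∀ acc : List β, l.foldl (fun a e => a ++ [f e]) acc = acc ++ l.map f := by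
  induction l with
  | nil => simp
  | cons c t ih => intro acc; simp [List.foldl, ih]

theorem altGo_eq (neg : Bool) (l : List Char) : ∀ (cur : List Char) (out : List String),
    dist_negimp_altGo neg l cur out
      = out ++ String.ofList (cur ++ (pvSc l).1)
          :: ((pvSc l).2).map (fun h => String.ofList ((if neg then ['~'] else []) ++ h)) := by
  induction l with
  | nil => intro cur out; simp [dist_negimp_altGo, pvSc]
  | cons c t ih =>
    intro cur out
    by_cases hc : c = '&'
    · subst hc
      simp only [dist_negimp_altGo, if_true, ih]
      simp [pvSc]
    · simp only [dist_negimp_altGo, hc, if_false, ih]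
      simp [pvSc, hc]

-- ===== VERDICT (by name: the statement is the Claim_ definition above) =====
theorem dist_negimp_spec : Claim_equal_dist_negimp := by
  intro exp _
  unfold Spec_dist_negimp dist_negimp dist_negimp_alt
  simp only [show "&".toList = ['&'] from rfl]
  rw [altGo_eq]
  by_cases hs : PySem.Str.startswith exp "~" = true
  · simp only [hs, if_true]
    rw [splitOn_eq]
    simp only [List.map_cons]
    rw [foldl_append_map]
    simp [List.map_map, Function.comp]
  · simp only [hs]
    rw [splitOn_eq]
    simp
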